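-- pv_equiv track=rewrite | github.com/dgurnari/graphtda | graphtda/bifiltration_utils.py | euler_characteristic_list_from_all
-- ===== SOURCE A (Python) =====
-- def euler_characteristic_list_from_all(local_contributions):
--
--     local_contributions = [(c[0][0], c[1]) for c in local_contributions]
--
--     euler_characteristic = []
--     old_f, current_characteristic = local_contributions[0]
--
--     for filtration, contribution in local_contributions[1:]:
--         if filtration > old_f:
--             euler_characteristic.append([old_f, current_characteristic])
--             old_f = filtration
--
--         current_characteristic += contribution
--
--     # add last contribution
--     if len(local_contributions) > 1:
--         euler_characteristic.append([filtration, current_characteristic])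
--
--     if len(local_contributions) == 1:
--         euler_characteristic.append(local_contributions[0])
--
--     return euler_characteristic
-- ===== SOURCE B (Python) =====
-- def euler_characteristic_list_from_all(local_contributions):
--     # Pass 1: group contributions into segments at each `filtration > label` boundary.
--     pairs = [(c[0][0], c[1]) for c in local_contributions]
--     first = pairs[0]
--     if len(pairs) == 1:
--         return [first]
--     groups = []
--     cur_label, cur_sum = first
--     for f, c in pairs[1:]:
--         if f > cur_label:
--             groups.append((cur_label, cur_sum))
--             cur_label, cur_sum = f, c
--         else:
--             cur_sum += c
--     groups.append((f, cur_sum))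
--     # Pass 2: prefix-sum over the group sums.
--     out = []
--     total = 0
--     for lab, s in groups:
--         total += s
--         out.append([lab, total])
--     return out
-- ===== Notes on version B (the rewrite author's own statement) =====
-- stated objective: alternative
-- what changed: Replaces A's single fused loop (running Euler characteristic appended at each boundary) with a two-pass decomposition: one pass groups contributions into (label, group-sum) segments at each filtration>label boundary, a second pass prefix-sums the group sums to emit the cumulative values.
-- outside the precondition, e.g. on euler_characteristic_list_from_all([]): A raises IndexError, B raises IndexError
import Mathlib
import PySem

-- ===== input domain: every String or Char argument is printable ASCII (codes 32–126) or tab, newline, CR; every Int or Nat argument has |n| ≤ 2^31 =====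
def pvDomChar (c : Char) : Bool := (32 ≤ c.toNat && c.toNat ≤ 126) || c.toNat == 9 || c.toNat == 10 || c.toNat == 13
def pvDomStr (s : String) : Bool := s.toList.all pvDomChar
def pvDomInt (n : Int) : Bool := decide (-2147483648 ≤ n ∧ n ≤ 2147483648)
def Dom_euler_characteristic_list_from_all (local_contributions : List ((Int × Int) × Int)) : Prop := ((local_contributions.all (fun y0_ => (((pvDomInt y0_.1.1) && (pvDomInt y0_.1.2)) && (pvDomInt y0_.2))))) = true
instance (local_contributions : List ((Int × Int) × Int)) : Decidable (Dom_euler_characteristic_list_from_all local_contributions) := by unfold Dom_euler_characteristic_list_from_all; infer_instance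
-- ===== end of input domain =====

-- B groups the contributions into (label, group-sum) segments in a first pass and recovers the
-- cumulative Euler characteristic with a prefix-sum second pass (alternative decomposition, same cost).

-- ===== PORT A =====
-- state: (euler_characteristic, old_f, current_characteristic, filtration)
def euler_characteristic_list_from_all (local_contributions : List ((Int × Int) × Int)) : List (List Int) :=
  let lc := local_contributions.map (fun c => (c.1.1, c.2))
  match lc with
  | [] => []  -- Python raises IndexError here; excluded by Pre_
  | (f0, c0) :: rest =>
    let st := rest.foldl
      (fun (s : List (List Int) × Int × Int × Int) fc =>
        let ec := s.1; let old_f := s.2.1; let cur := s.2.2.1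
        let f := fc.1; let c := fc.2
        if f > old_f then (ec ++ [[old_f, cur]], f, cur + c, f)
        else (ec, old_f, cur + c, f))
      ([], f0, c0, f0)
    if lc.length > 1 then st.1 ++ [[st.2.2.2, st.2.2.1]]
    else [[f0, c0]]

-- ===== PORT B =====
-- pass 2 of Source B: prefix-sum over the group sums; state (out, total)
def pvPass2 (groups : List (Int × Int)) (st : List (List Int) × Int) : List (List Int) × Int :=
  groups.foldl (fun s g => (s.1 ++ [[g.1, s.2 + g.2]], s.2 + g.2)) st

def euler_characteristic_list_from_all_alt (local_contributions : List ((Int × Int) × Int)) : List (List Int) :=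
  let pairs := local_contributions.map (fun c => (c.1.1, c.2))
  match pairs with
  | [] => []  -- Python raises IndexError here; excluded by Pre_
  | first :: rest =>
    if pairs.length == 1 then [[first.1, first.2]]
    else
      -- pass 1: state (groups, cur_label, cur_sum, last filtration seen)
      let st := rest.foldl
        (fun (s : List (Int × Int) × Int × Int × Int) fc =>
          let groups := s.1; let lab := s.2.1; let sum := s.2.2.1
          let f := fc.1; let c := fc.2
          if f > lab then (groups ++ [(lab, sum)], f, c, f)
          else (groups, lab, sum + c, f))
        ([], first.1, first.2, first.1)
      (pvPass2 (st.1 ++ [(st.2.2.2, st.2.2.1)]) ([], 0)).1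

-- ===== PRECONDITION & SPEC =====
-- Pre_ excludes only the empty list, on which Python A raises IndexError.
def Pre_euler_characteristic_list_from_all (local_contributions : List ((Int × Int) × Int)) : Prop :=
  local_contributions ≠ []
instance (local_contributions : List ((Int × Int) × Int)) : Decidable (Pre_euler_characteristic_list_from_all local_contributions) := by unfold Pre_euler_characteristic_list_from_all; infer_instance

def pvWitness_euler_characteristic_list_from_all : (List ((Int × Int) × Int)) := [((0, 0), 1), ((1, 0), 2)]

def Spec_euler_characteristic_list_from_all (local_contributions : List ((Int × Int) × Int)) (out : List (List Int)) : Prop := out = euler_characteristic_list_from_all_alt local_contributions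
instance (local_contributions : List ((Int × Int) × Int)) (out : List (List Int)) : Decidable (Spec_euler_characteristic_list_from_all local_contributions out) := by unfold Spec_euler_characteristic_list_from_all; infer_instance

-- ===== CLAIM (what is proved, stated in full; the proofs are below) =====
def Claim_equal_euler_characteristic_list_from_all : Prop := ∀ (local_contributions : List ((Int × Int) × Int)), Dom_euler_characteristic_list_from_all local_contributions → Pre_euler_characteristic_list_from_all local_contributions → Spec_euler_characteristic_list_from_all local_contributions (euler_characteristic_list_from_all local_contributions)

-- ===== LEMMAS AND PROOFS =====

def pvSumSnd (gs : List (Int × Int)) : Int := (gs.map Prod.snd).sum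

theorem pvPass2_snd (gs : List (Int × Int)) (st : List (List Int) × Int) :
    (pvPass2 gs st).2 = st.2 + pvSumSnd gs := by
  induction gs generalizing st with
  | nil => simp [pvPass2, pvSumSnd]
  | cons g t ih =>
    simp only [pvPass2, List.foldl_cons] at *
    rw [ih]
    simp [pvSumSnd]; ring

theorem pvPass2_append (gs : List (Int × Int)) (x : Int × Int) (st : List (List Int) × Int) :
    pvPass2 (gs ++ [x]) st =
      ((pvPass2 gs st).1 ++ [[x.1, (pvPass2 gs st).2 + x.2]], (pvPass2 gs st).2 + x.2) := by
  simp [pvPass2, List.foldl_append]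

theorem pvPass2_foldl_snd (gs : List (Int × Int)) (acc : List (List Int)) (t : Int) :
    (List.foldl (fun (s : List (List Int) × Int) (g : Int × Int) =>
        (s.1 ++ [[g.1, s.2 + g.2]], s.2 + g.2)) (acc, t) gs).2 = t + pvSumSnd gs :=
  pvPass2_snd gs (acc, t)

-- loop invariant linking A's fold state to B's pass-1 fold state
theorem pvLoop_eq (rest : List (Int × Int)) :
    ∀ (groups : List (Int × Int)) (old cur filt sum : Int),
    cur = pvSumSnd groups + sum →
    (let stA := rest.foldl
        (fun (s : List (List Int) × Int × Int × Int) fc =>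
          let ec := s.1; let old_f := s.2.1; let curc := s.2.2.1
          let f := fc.1; let c := fc.2
          if f > old_f then (ec ++ [[old_f, curc]], f, curc + c, f)
          else (ec, old_f, curc + c, f))
        ((pvPass2 groups ([], 0)).1, old, cur, filt)
     let stB := rest.foldl
        (fun (s : List (Int × Int) × Int × Int × Int) fc =>
          let gr := s.1; let lab := s.2.1; let sm := s.2.2.1
          let f := fc.1; let c := fc.2
          if f > lab then (gr ++ [(lab, sm)], f, c, f)
          else (gr, lab, sm + c, f))
        (groups, old, sum, filt)
     stA.1 = (pvPass2 stB.1 ([], 0)).1 ∧ stA.2.1 = stB.2.1 ∧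
       stA.2.2.1 = pvSumSnd stB.1 + stB.2.2.1 ∧ stA.2.2.2 = stB.2.2.2) := by
  induction rest with
  | nil => intro groups old cur filt sum hcur; exact ⟨rfl, rfl, hcur, rfl⟩
  | cons fc t ih =>
    intro groups old cur filt sum hcur
    simp only [List.foldl_cons]
    by_cases h : fc.1 > old
    · have h1 : (pvPass2 groups ([], 0)).1 ++ [[old, cur]]
          = (pvPass2 (groups ++ [(old, sum)]) ([], (0:Int))).1 := by
        rw [pvPass2_append]
        have : (pvPass2 groups (([] : List (List Int)), (0:Int))).2 = pvSumSnd groups := by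
          rw [pvPass2_snd]; ring
        simp [this, hcur]
      simp only [gt_iff_lt] at h ⊢
      rw [if_pos h, if_pos h, h1]
      exact ih (groups ++ [(old, sum)]) fc.1 (cur + fc.2) fc.1 fc.2
        (by simp [hcur, pvSumSnd])
    · simp only [gt_iff_lt] at h ⊢
      rw [if_neg h, if_neg h]
      exact ih groups old (cur + fc.2) fc.1 (sum + fc.2) (by rw [hcur]; ring)

-- ===== VERDICT (by name: the statement is the Claim_ definition above) =====
theorem euler_characteristic_list_from_all_spec : Claim_equal_euler_characteristic_list_from_all := by
  intro lc _ hpre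
  unfold Spec_euler_characteristic_list_from_all
  unfold euler_characteristic_list_from_all euler_characteristic_list_from_all_alt
  match hlc : lc with
  | [] => exact absurd rfl hpre
  | x :: xs =>
    simp only [List.map_cons]
    cases xs with
    | nil => simp
    | cons y ys =>
      simp only [List.map_cons, List.length_cons]
      have hmain := pvLoop_eq ((y :: ys).map (fun c => (c.1.1, c.2))) [] x.1.1 x.2 x.1.1 x.2
        (by simp [pvSumSnd])
      simp only [pvPass2, List.foldl_nil, List.map_cons] at hmain
      obtain ⟨h1, _, h3, h4⟩ := hmain
      rw [if_pos (by simp [List.length_map])]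
      rw [if_neg (by simp [List.length_map])]
      rw [h1, h3, h4, pvPass2_append]
      simp [pvPass2, pvPass2_foldl_snd]

theorem euler_characteristic_list_from_all_pre_witness :
    Dom_euler_characteristic_list_from_all pvWitness_euler_characteristic_list_from_all ∧
    Pre_euler_characteristic_list_from_all pvWitness_euler_characteristic_list_from_all := by
  decide
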